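-- pv_equiv track=rewrite | github.com/Montikks/sda-python-intermediate | functional/partial_function.py | default_sum
-- ===== SOURCE A (Python) =====
-- def default_sum(iter_, init=None):
--     """
--     :param iter_: Iterable whose elements are summed
--     :param init: Initial value of the sum. If None (default), first element of iter_ becomes init.
--                  If init not specified and iter_ is empty, returns None
--     :return: Sum of elements
--     """
--     result = init
--     for elem in iter_:
--         if result is None:
--             result = elem
--             continue
--         result += elem
--
--     return result
-- ===== SOURCE B (Python) =====
-- def default_sum(iter_, init=None):
--     lst = list(iter_)
--     total = sum(lst)
--     if init is not None:
--         return init + total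
--     return total if lst else None
-- ===== Notes on version B (the rewrite author's own statement) =====
-- stated objective: simpler
-- what changed: Instead of A's single fold with an Option accumulator that treats the first element as a special base case, B sums the whole list unconditionally (no base-element logic) and then combines the grand total with init or, if init is None, returns the total only when the list is nonempty; correctness rests on associativity/commutativity of integer addition.
import Mathlib
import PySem

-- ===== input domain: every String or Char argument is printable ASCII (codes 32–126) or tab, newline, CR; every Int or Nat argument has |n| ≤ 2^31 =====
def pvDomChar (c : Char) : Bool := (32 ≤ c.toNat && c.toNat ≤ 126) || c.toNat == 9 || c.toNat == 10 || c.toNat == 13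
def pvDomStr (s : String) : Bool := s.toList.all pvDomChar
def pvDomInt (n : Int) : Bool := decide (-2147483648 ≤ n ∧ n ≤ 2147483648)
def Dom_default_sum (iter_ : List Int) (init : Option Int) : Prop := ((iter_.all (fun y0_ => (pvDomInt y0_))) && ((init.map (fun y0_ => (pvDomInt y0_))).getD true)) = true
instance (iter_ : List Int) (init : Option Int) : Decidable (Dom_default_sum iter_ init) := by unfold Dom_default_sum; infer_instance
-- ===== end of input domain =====

-- B: simpler — sums the whole list unconditionally, then combines the total with init (or checks emptiness), instead of A's fold with an Option accumulator and first-element base case.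


-- ===== PORT A =====
-- Port of A: single fold with an Option accumulator; a none accumulator takes
-- the element, otherwise it adds it.
def default_sum (iter_ : List Int) (init : Option Int) : Option Int :=
  iter_.foldl (fun result elem =>
    match result with
    | none => some elem
    | some v => some (v + elem)) init

-- ===== PORT B =====
-- Port of B: sum the whole list (Python's sum(lst), a plain fold from 0), then
-- add init if given, else return the total only when the list is nonempty.
def default_sum_alt (iter_ : List Int) (init : Option Int) : Option Int :=
  let total := iter_.foldl (· + ·) 0
  match init with
  | some v => some (v + total)
  | none => if iter_ ≠ [] then some total else none

-- ===== PRECONDITION & SPEC =====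
def Spec_default_sum (iter_ : List Int) (init : Option Int) (out : Option Int) : Prop := out = default_sum_alt iter_ init
instance (iter_ : List Int) (init : Option Int) (out : Option Int) : Decidable (Spec_default_sum iter_ init out) := by unfold Spec_default_sum; infer_instance

-- ===== CLAIM (what is proved, stated in full; the proofs are below) =====
def Claim_equal_default_sum : Prop := ∀ (iter_ : List Int) (init : Option Int), Dom_default_sum iter_ init → Spec_default_sum iter_ init (default_sum iter_ init)

-- ===== LEMMAS AND PROOFS =====

-- The plain Int fold from v equals v plus the fold from 0.
theorem foldl_add_shift (xs : List Int) (v : Int) :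
    xs.foldl (· + ·) v = v + xs.foldl (· + ·) 0 := by
  induction xs generalizing v with
  | nil => simp
  | cons x xs ih =>
    simp only [List.foldl]
    rw [ih (v + x), ih (0 + x)]
    ring

-- A's fold, once the accumulator is `some v`, is the plain Int fold.
theorem default_sum_foldl_some (xs : List Int) (v : Int) :
    xs.foldl (fun result elem =>
      match result with
      | none => some elem
      | some w => some (w + elem)) (some v) = some (xs.foldl (· + ·) v) := by
  induction xs generalizing v with
  | nil => rfl
  | cons x xs ih => simp [List.foldl, ih]

-- ===== VERDICT =====
theorem default_sum_spec : Claim_equal_default_sum := by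
  intro iter_ init _
  unfold Spec_default_sum default_sum default_sum_alt
  cases init with
  | some v =>
    rw [default_sum_foldl_some, foldl_add_shift]
  | none =>
    cases iter_ with
    | nil => rfl
    | cons x xs =>
      simp only [List.foldl, default_sum_foldl_some, ne_eq, reduceCtorEq,
        not_false_eq_true, if_pos]
      rw [foldl_add_shift xs x, foldl_add_shift xs (0 + x)]
      ring_nf
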